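-- pv_equiv track=rewrite | github.com/devanshbhatia26/HackerRank | Twin Arrays.py | twinArrays
-- ===== SOURCE A (Python) =====
-- def twinArrays(ar1, ar2):
--     m1 = min(ar1)
--     m2 = min(ar2)
--     im1 = []
--     for i in range(len(ar1)):
--         if ar1[i]==m1:
--             im1.append(i)
--     im2 = []
--     for i in range(len(ar2)):
--         if ar2[i]==m2:
--             im2.append(i)
--     if im1[0]!=im2[0] or len(im1)>1 or len(im2)>1:
--         return m1+m2
--     t1 = ar1[:]
--     t2 = ar2[:]
--     t1.remove(m1)
--     t2.remove(m2)
--     nm1 = min(t1)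
--     nm2 = min(t2)
--     return min(nm1+m2,nm2+m1)
-- ===== SOURCE B (Python) =====
-- def twinArrays(ar1, ar2):
--     def two_smallest(ar):
--         best = None
--         second = None
--         for i, x in enumerate(ar):
--             if best is None or x < best[0]:
--                 second = best
--                 best = (x, i)
--             elif second is None or x < second[0]:
--                 second = (x, i)
--         cands = []
--         if best is not None:
--             cands.append(best)
--         if second is not None:
--             cands.append(second)
--         return cands
--     c1 = two_smallest(ar1)
--     c2 = two_smallest(ar2)
--     return min(v + w for (v, i) in c1 for (w, j) in c2 if i != j)
-- ===== Notes on version B (the rewrite author's own statement) =====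
-- stated objective: alternative
-- what changed: Instead of A's min-index-list building, len>1 branching and copy/remove/second-min recomputation, B tracks the two smallest (value,index) pairs of each array in one pass and returns the minimum over the at-most-2x2 grid of candidate pairs with distinct indices.
import Mathlib
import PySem

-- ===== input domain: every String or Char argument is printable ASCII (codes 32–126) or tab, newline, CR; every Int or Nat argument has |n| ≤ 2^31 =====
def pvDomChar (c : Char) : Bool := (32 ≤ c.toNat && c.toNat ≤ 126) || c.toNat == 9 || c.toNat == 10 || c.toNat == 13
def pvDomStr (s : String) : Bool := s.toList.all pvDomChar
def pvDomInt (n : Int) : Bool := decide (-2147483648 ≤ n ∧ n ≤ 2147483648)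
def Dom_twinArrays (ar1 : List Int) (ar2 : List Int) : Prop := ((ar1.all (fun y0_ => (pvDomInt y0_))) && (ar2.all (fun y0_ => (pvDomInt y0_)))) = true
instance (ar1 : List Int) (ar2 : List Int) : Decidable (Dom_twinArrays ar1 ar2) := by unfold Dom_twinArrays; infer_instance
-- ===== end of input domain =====

-- B tracks the two smallest (value,index) pairs of each array in one pass and minimises
-- over the distinct-index candidate grid, replacing A's min-index lists and copy/remove.
-- ===== PORT A =====
def twinArrays (ar1 : List Int) (ar2 : List Int) : Int :=
  match PySem.List.min? ar1 (fun y => y), PySem.List.min? ar2 (fun y => y) with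
  | some m1, some m2 =>
    let im1 := (PySem.List.pyRange 0 ar1.length 1).foldl
      (fun acc i => if PySem.List.pyGet? ar1 i = some m1 then acc ++ [i] else acc) []
    let im2 := (PySem.List.pyRange 0 ar2.length 1).foldl
      (fun acc i => if PySem.List.pyGet? ar2 i = some m2 then acc ++ [i] else acc) []
    if PySem.List.pyGet? im1 0 ≠ PySem.List.pyGet? im2 0 ∨ im1.length > 1 ∨ im2.length > 1 then
      m1 + m2
    else
      match PySem.List.remove? ar1 m1, PySem.List.remove? ar2 m2 with
      | some t1, some t2 =>
        match PySem.List.min? t1 (fun y => y), PySem.List.min? t2 (fun y => y) with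
        | some nm1, some nm2 => min (nm1 + m2) (nm2 + m1)
        | _, _ => 0  -- unreachable inside Pre_ (Python raises ValueError)
      | _, _ => 0    -- unreachable: m1 ∈ ar1, m2 ∈ ar2
  | _, _ => 0        -- unreachable inside Pre_ (Python raises ValueError on empty)

-- ===== PORT B =====
def pvTwoSmallestStep (st : Option (Int × Int) × Option (Int × Int)) (p : Int × Int) :
    Option (Int × Int) × Option (Int × Int) :=
  match st, p with
  | (none, _), (i, x) => (some (x, i), none)          -- second = best (= None); best = (x, i)
  | (some (bv, bi), second), (i, x) =>
    if x < bv then (some (x, i), some (bv, bi))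
    else
      match second with
      | none => (some (bv, bi), some (x, i))
      | some (sv, si) =>
        if x < sv then (some (bv, bi), some (x, i)) else (some (bv, bi), some (sv, si))

def pvTwoSmallest (ar : List Int) : List (Int × Int) :=
  let r := (PySem.List.enumerate ar).foldl pvTwoSmallestStep (none, none)
  (match r.1 with | some b => [b] | none => []) ++
  (match r.2 with | some s => [s] | none => [])

def twinArrays_alt (ar1 : List Int) (ar2 : List Int) : Int :=
  let c1 := pvTwoSmallest ar1
  let c2 := pvTwoSmallest ar2
  let cands := c1.flatMap (fun vi => (c2.filter (fun wj => vi.2 ≠ wj.2)).map (fun wj => vi.1 + wj.1))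
  (PySem.List.min? cands (fun y => y)).getD 0

-- ===== PRECONDITION & SPEC =====
-- both minima unique and at the same index (reader-checkable via count/idxOf of the min)
def pvBadCollision (ar1 : List Int) (ar2 : List Int) : Bool :=
  (ar1.min?.bind (fun m1 => ar2.min?.map (fun m2 =>
    ar1.count m1 == 1 && ar2.count m2 == 1 && ar1.idxOf m1 == ar2.idxOf m2))).getD false

-- Pre_ excludes exactly the inputs where Python A raises ValueError: an empty array, or a
-- unique same-index minimum collision with a length-1 array (min() of an empty remainder).
def Pre_twinArrays (ar1 : List Int) (ar2 : List Int) : Prop :=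
  ar1 ≠ [] ∧ ar2 ≠ [] ∧
  ¬ ((ar1.length = 1 ∨ ar2.length = 1) ∧ pvBadCollision ar1 ar2 = true)
instance (ar1 : List Int) (ar2 : List Int) : Decidable (Pre_twinArrays ar1 ar2) := by
  unfold Pre_twinArrays; infer_instance

def pvWitness_twinArrays : List Int × List Int := ([1, 2], [3, 4])

def Spec_twinArrays (ar1 : List Int) (ar2 : List Int) (out : Int) : Prop := out = twinArrays_alt ar1 ar2
instance (ar1 : List Int) (ar2 : List Int) (out : Int) : Decidable (Spec_twinArrays ar1 ar2 out) := by unfold Spec_twinArrays; infer_instance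

-- ===== CLAIM (what is proved, stated in full; the proofs are below) =====
def Claim_equal_twinArrays : Prop := ∀ (ar1 : List Int) (ar2 : List Int), Dom_twinArrays ar1 ar2 → Pre_twinArrays ar1 ar2 → Spec_twinArrays ar1 ar2 (twinArrays ar1 ar2)

-- ===== LEMMAS AND PROOFS =====

-- proof-only helper: Python's min of a nonempty list (junk 0 on [])
def pvMval : List Int → Int
  | [] => 0
  | h :: t => t.foldl min h

theorem pvMval_mem {ar : List Int} (h : ar ≠ []) : pvMval ar ∈ ar := by
  cases ar with
  | nil => simp at h
  | cons a t =>
    rcases PySem.List.foldl_min_mem t a with h' | h' <;> simp [pvMval, h']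

theorem pvMval_le {ar : List Int} : ∀ y ∈ ar, pvMval ar ≤ y := by
  cases ar with
  | nil => simp
  | cons a t =>
    intro y hy
    rcases List.mem_cons.1 hy with rfl | hy
    · exact (PySem.List.foldl_min_le t y).1
    · exact (PySem.List.foldl_min_le t a).2 y hy

theorem pvMval_eq {ar : List Int} {v : Int} (hv : v ∈ ar) (hle : ∀ y ∈ ar, v ≤ y) :
    pvMval ar = v :=
  le_antisymm (pvMval_le v hv) (hle _ (pvMval_mem (by rintro rfl; simp at hv)))

theorem pvMval_append {l : List Int} (h : l ≠ []) (x : Int) :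
    pvMval (l ++ [x]) = min (pvMval l) x := by
  cases l with
  | nil => simp at h
  | cons a t => simp [pvMval, List.foldl_append]

theorem pvMin?_id {ar : List Int} (h : ar ≠ []) :
    PySem.List.min? ar (fun y => y) = some (pvMval ar) := by
  cases ar with
  | nil => simp at h
  | cons a t => rw [PySem.List.min?_id_cons]; rfl

theorem pvMinList?_eq {ar : List Int} (h : ar ≠ []) : ar.min? = some (pvMval ar) := by
  cases ar with
  | nil => simp at h
  | cons a t => rw [List.min?_cons']; rfl

theorem pvMinid_getD {l : List Int} {v : Int} (hv : v ∈ l) (hle : ∀ y ∈ l, v ≤ y) :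
    (PySem.List.min? l (fun y => y)).getD 0 = v := by
  rw [pvMin?_id (by rintro rfl; simp at hv)]
  simp [pvMval_eq hv hle]

-- proof-only helper: indices at which xs carries the value m
def pvF (xs : List Int) (m : Int) : List Nat :=
  (List.range xs.length).filter (fun k => decide (xs[k]? = some m))

theorem pvF_cons (x : Int) (xs : List Int) (m : Int) :
    pvF (x :: xs) m = (if x = m then [0] else []) ++ (pvF xs m).map Nat.succ := by
  unfold pvF
  simp only [List.length_cons]
  rw [List.range_succ_eq_map, List.filter_cons, List.filter_map]
  simp [Function.comp_def]
  split_ifs <;> rfl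

theorem pvF_length (xs : List Int) (m : Int) : (pvF xs m).length = xs.count m := by
  induction xs with
  | nil => simp [pvF]
  | cons x t ih =>
    rw [pvF_cons]
    simp [List.count_cons, ih]
    split_ifs <;> simp <;> omega

theorem pvF_head {xs : List Int} {m : Int} (h : m ∈ xs) :
    (pvF xs m).head? = some (xs.idxOf m) := by
  induction xs with
  | nil => simp at h
  | cons x t ih =>
    rw [pvF_cons]
    by_cases hx : x = m
    · simp [hx, List.idxOf_cons_self]
    · have hmt : m ∈ t := by rcases List.mem_cons.1 h with rfl | h' <;> [exact absurd rfl hx; exact h']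
      have hne : ¬ (x == m) := by simpa using hx
      simp [hx, List.head?_map, ih hmt, Nat.succ_eq_add_one]

theorem pvIm_eq (xs : List Int) (m : Int) :
    (PySem.List.pyRange 0 xs.length 1).foldl
      (fun acc i => if PySem.List.pyGet? xs i = some m then acc ++ [i] else acc) []
    = (pvF xs m).map (Nat.cast : Nat → Int) := by
  rw [PySem.List.pyRange_one, List.foldl_map, PySem.List.foldl_append_ite]
  simp [pvF, List.map_eq_flatMap]

-- invariant of B's single pass: first component is (min, first argmin), second component is
-- (min of the list with that occurrence erased, some other index) once the list has ≥ 2 elements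
theorem pvPass_spec (ar : List Int) (h : ar ≠ []) :
    ((PySem.List.enumerate ar).foldl pvTwoSmallestStep (none, none)).1
      = some (pvMval ar, (ar.idxOf (pvMval ar) : Int)) ∧
    ((ar.length = 1 ∧ ((PySem.List.enumerate ar).foldl pvTwoSmallestStep (none, none)).2 = none) ∨
     (2 ≤ ar.length ∧ ∃ i1 : Int, i1 ≠ (ar.idxOf (pvMval ar) : Int) ∧
       ((PySem.List.enumerate ar).foldl pvTwoSmallestStep (none, none)).2
         = some (pvMval (ar.erase (pvMval ar)), i1))) := by
  induction ar using List.reverseRecOn with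
  | nil => simp at h
  | append_singleton xs x ih =>
    rcases eq_or_ne xs [] with rfl | hxs
    · simp [PySem.List.enumerate_cons, PySem.List.enumerate_nil, pvTwoSmallestStep, pvMval]
    · have hb := (ih hxs).1
      have hs := (ih hxs).2
      have hm_mem := pvMval_mem hxs
      have hi0 : xs.idxOf (pvMval xs) < xs.length := List.idxOf_lt_length_of_mem hm_mem
      have hlpos : 0 < xs.length := List.length_pos_of_ne_nil hxs
      rw [PySem.List.enumerate_append] at *
      simp only [PySem.List.enumerate_cons, PySem.List.enumerate_nil, List.foldl_append,
        List.foldl_cons, List.foldl_nil, zero_add] at *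
      rcases hR : (PySem.List.enumerate xs).foldl pvTwoSmallestStep (none, none) with ⟨r1, r2⟩
      rw [hR] at hb hs
      simp only at hb hs
      rw [hb]
      by_cases hx : x < pvMval xs
      · have hxnot : x ∉ xs := fun hmem => absurd (pvMval_le x hmem) (not_le.2 hx)
        have hmv : pvMval (xs ++ [x]) = x := by
          rw [pvMval_append hxs]; exact min_eq_right hx.le
        have hidx : (xs ++ [x]).idxOf x = xs.length := by
          rw [List.idxOf_append_of_notMem hxnot]; simp
        have her : (xs ++ [x]).erase x = xs := by
          rw [List.erase_append_right _ hxnot]; simp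
        refine ⟨by simp [pvTwoSmallestStep, if_pos hx, hmv, hidx], Or.inr ⟨by simp; omega,
          (xs.idxOf (pvMval xs) : Int), ?_, ?_⟩⟩
        · rw [hmv, hidx]; exact_mod_cast hi0.ne
        · simp [pvTwoSmallestStep, if_pos hx, hmv, her]
      · have hmle : pvMval xs ≤ x := not_lt.1 hx
        have hmv : pvMval (xs ++ [x]) = pvMval xs := by
          rw [pvMval_append hxs]; exact min_eq_left hmle
        have hidx : (xs ++ [x]).idxOf (pvMval xs) = xs.idxOf (pvMval xs) :=
          List.idxOf_append_of_mem hm_mem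
        have her : (xs ++ [x]).erase (pvMval xs) = xs.erase (pvMval xs) ++ [x] :=
          List.erase_append_left _ hm_mem
        refine ⟨?_, ?_⟩
        · rcases r2 with _ | ⟨sv, si⟩
          · simp [pvTwoSmallestStep, hx, hmv, hidx]
          · by_cases hxe : x < sv <;> simp [pvTwoSmallestStep, hx, hxe, hmv, hidx]
        rcases hs with ⟨hlen1, hr2⟩ | ⟨hlen2, i1, hi1, hr2⟩
        · subst hr2
          rcases List.length_eq_one_iff.1 hlen1 with ⟨a, rfl⟩
          refine Or.inr ⟨by simp, ([a].length : Int), ?_, ?_⟩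
          · rw [hmv, hidx]; simp [pvMval]
          · simp only [pvMval, List.foldl_nil] at hx
            simp [pvTwoSmallestStep, hx, hmv, her, pvMval, min_eq_left (not_lt.1 hx)]
        · rw [hr2]
          have hernn : xs.erase (pvMval xs) ≠ [] := by
            have := List.length_erase_of_mem hm_mem
            intro hnil; rw [hnil] at this; simp at this; omega
          have hmvE : pvMval ((xs ++ [x]).erase (pvMval (xs ++ [x])))
              = min (pvMval (xs.erase (pvMval xs))) x := by
            rw [hmv, her, pvMval_append hernn]
          by_cases hx2 : x < pvMval (xs.erase (pvMval xs))
          · refine Or.inr ⟨by simp; omega, (xs.length : Int), ?_, ?_⟩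
            · rw [hmv, hidx]; exact_mod_cast hi0.ne'
            · rw [hmvE, min_eq_right hx2.le]
              simp [pvTwoSmallestStep, if_neg hx, if_pos hx2]
          · refine Or.inr ⟨by simp; omega, i1, ?_, ?_⟩
            · rw [hmv, hidx]; exact hi1
            · rw [hmvE, min_eq_left (not_lt.1 hx2)]
              simp [pvTwoSmallestStep, if_neg hx, if_neg hx2]

theorem pvTwoSmallest_eq (ar : List Int) (h : ar ≠ []) :
    (ar.length = 1 ∧ pvTwoSmallest ar = [(pvMval ar, (ar.idxOf (pvMval ar) : Int))]) ∨
    (2 ≤ ar.length ∧ ∃ i1 : Int, i1 ≠ (ar.idxOf (pvMval ar) : Int) ∧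
       pvTwoSmallest ar = [(pvMval ar, (ar.idxOf (pvMval ar) : Int)),
                           (pvMval (ar.erase (pvMval ar)), i1)]) := by
  obtain ⟨hb, hs⟩ := pvPass_spec ar h
  unfold pvTwoSmallest
  rcases hs with ⟨h1, h2⟩ | ⟨h2, i1, hi1, hr⟩
  · exact Or.inl ⟨h1, by simp [hb, h2]⟩
  · exact Or.inr ⟨h2, i1, hi1, by simp [hb, hr]⟩

theorem pvErase_ne_nil {ar : List Int} (h2 : 2 ≤ ar.length) : ar.erase (pvMval ar) ≠ [] := by
  have hne : ar ≠ [] := by intro hh; simp [hh] at h2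
  have hlen := List.length_erase_of_mem (pvMval_mem hne)
  intro hh; rw [hh] at hlen; simp at hlen; omega

theorem pvNm_mem {ar : List Int} (h2 : 2 ≤ ar.length) :
    pvMval (ar.erase (pvMval ar)) ∈ ar :=
  List.mem_of_mem_erase (pvMval_mem (pvErase_ne_nil h2))

theorem pvNm_ge {ar : List Int} (h2 : 2 ≤ ar.length) :
    pvMval ar ≤ pvMval (ar.erase (pvMval ar)) :=
  pvMval_le _ (pvNm_mem h2)

theorem pvNm_of_count {ar : List Int} (hc : 1 < ar.count (pvMval ar)) :
    pvMval (ar.erase (pvMval ar)) = pvMval ar := by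
  have hmemE : pvMval ar ∈ ar.erase (pvMval ar) := by
    rw [← List.count_pos_iff, List.count_erase_self]
    omega
  exact pvMval_eq hmemE (fun y hy => pvMval_le y (List.mem_of_mem_erase hy))

theorem pvCount_pos {ar : List Int} (h : ar ≠ []) : 1 ≤ ar.count (pvMval ar) :=
  List.count_pos_iff.2 (pvMval_mem h)

-- A's branch condition, reduced to idxOf / count of the minima
theorem pvA_cond {ar1 ar2 : List Int} (h1 : ar1 ≠ []) (h2 : ar2 ≠ []) :
    twinArrays ar1 ar2 =
      if ar1.idxOf (pvMval ar1) ≠ ar2.idxOf (pvMval ar2)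
          ∨ 1 < ar1.count (pvMval ar1) ∨ 1 < ar2.count (pvMval ar2) then
        pvMval ar1 + pvMval ar2
      else
        match PySem.List.min? (ar1.erase (pvMval ar1)) (fun y => y),
              PySem.List.min? (ar2.erase (pvMval ar2)) (fun y => y) with
        | some nm1, some nm2 => min (nm1 + pvMval ar2) (nm2 + pvMval ar1)
        | _, _ => 0 := by
  unfold twinArrays
  rw [pvMin?_id h1, pvMin?_id h2]
  simp only [pvIm_eq]
  rw [PySem.List.remove?_eq_some_erase _ _ (pvMval_mem h1),
    PySem.List.remove?_eq_some_erase _ _ (pvMval_mem h2)]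
  have hhead : ∀ (ar : List Int), ar ≠ [] →
      PySem.List.pyGet? ((pvF ar (pvMval ar)).map (Nat.cast : Nat → Int)) 0
        = some ((ar.idxOf (pvMval ar) : Int)) := by
    intro ar har
    have hf := pvF_head (pvMval_mem har)
    cases hpf : pvF ar (pvMval ar) with
    | nil => rw [hpf] at hf; simp at hf
    | cons a t =>
      rw [hpf] at hf
      simp only [List.head?_cons, Option.some.injEq] at hf
      rw [PySem.List.pyGet?_zero]
      simp [hf]
  have hhead1 := hhead ar1 h1
  have hhead2 := hhead ar2 h2
  rw [hhead1, hhead2]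
  simp only [List.length_map, pvF_length]
  by_cases hc : ar1.idxOf (pvMval ar1) ≠ ar2.idxOf (pvMval ar2)
      ∨ 1 < ar1.count (pvMval ar1) ∨ 1 < ar2.count (pvMval ar2)
  · rw [if_pos hc, if_pos]
    rcases hc with hc | hc | hc
    · exact Or.inl (by simpa using hc)
    · exact Or.inr (Or.inl hc)
    · exact Or.inr (Or.inr hc)
  · rw [if_neg hc, if_neg]
    intro hcc
    rcases hcc with hcc | hcc | hcc
    · exact hc (Or.inl (by simpa using hcc))
    · exact hc (Or.inr (Or.inl hcc))
    · exact hc (Or.inr (Or.inr hcc))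

theorem pvSingleton {ar : List Int} (h : ar.length = 1) :
    ar.idxOf (pvMval ar) = 0 ∧ ar.count (pvMval ar) = 1 := by
  rcases List.length_eq_one_iff.1 h with ⟨a, rfl⟩
  simp [pvMval]

theorem pvBad_true {ar1 ar2 : List Int} (h1 : ar1 ≠ []) (h2 : ar2 ≠ [])
    (hidx : ar1.idxOf (pvMval ar1) = ar2.idxOf (pvMval ar2))
    (hc1 : ar1.count (pvMval ar1) = 1) (hc2 : ar2.count (pvMval ar2) = 1) :
    pvBadCollision ar1 ar2 = true := by
  unfold pvBadCollision
  rw [pvMinList?_eq h1, pvMinList?_eq h2]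
  simp [hc1, hc2, hidx]

theorem pvA_easy {ar1 ar2 : List Int} (h1 : ar1 ≠ []) (h2 : ar2 ≠ [])
    (hcnd : ar1.idxOf (pvMval ar1) ≠ ar2.idxOf (pvMval ar2)
        ∨ 1 < ar1.count (pvMval ar1) ∨ 1 < ar2.count (pvMval ar2)) :
    twinArrays ar1 ar2 = pvMval ar1 + pvMval ar2 := by
  rw [pvA_cond h1 h2, if_pos hcnd]

theorem pvA_hard {ar1 ar2 : List Int} (h1 : ar1 ≠ []) (h2 : ar2 ≠ [])
    (hl1 : 2 ≤ ar1.length) (hl2 : 2 ≤ ar2.length)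
    (hcnd : ¬ (ar1.idxOf (pvMval ar1) ≠ ar2.idxOf (pvMval ar2)
        ∨ 1 < ar1.count (pvMval ar1) ∨ 1 < ar2.count (pvMval ar2))) :
    twinArrays ar1 ar2 = min (pvMval (ar1.erase (pvMval ar1)) + pvMval ar2)
                             (pvMval (ar2.erase (pvMval ar2)) + pvMval ar1) := by
  rw [pvA_cond h1 h2, if_neg hcnd, pvMin?_id (pvErase_ne_nil hl1), pvMin?_id (pvErase_ne_nil hl2)]

theorem pvAlt_eq {ar1 ar2 : List Int} (v : Int)
    (hmem : ∃ p ∈ pvTwoSmallest ar1, ∃ q ∈ pvTwoSmallest ar2, p.2 ≠ q.2 ∧ p.1 + q.1 = v)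
    (hle : ∀ p ∈ pvTwoSmallest ar1, ∀ q ∈ pvTwoSmallest ar2, p.2 ≠ q.2 → v ≤ p.1 + q.1) :
    twinArrays_alt ar1 ar2 = v := by
  unfold twinArrays_alt
  apply pvMinid_getD
  · obtain ⟨p, hp, q, hq, hne, hv⟩ := hmem
    simp only [List.mem_flatMap, List.mem_map, List.mem_filter]
    exact ⟨p, hp, q, ⟨hq, by simpa using hne⟩, hv⟩
  · intro y hy
    simp only [List.mem_flatMap, List.mem_map, List.mem_filter] at hy
    obtain ⟨p, hp, q, ⟨hq, hne⟩, hv⟩ := hy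
    exact hv ▸ hle p hp q hq (by simpa using hne)

theorem pvEquiv (ar1 ar2 : List Int) (hpre : Pre_twinArrays ar1 ar2) :
    twinArrays ar1 ar2 = twinArrays_alt ar1 ar2 := by
  obtain ⟨h1, h2, hbig⟩ := hpre
  rcases pvTwoSmallest_eq ar1 h1 with ⟨hl1, hts1⟩ | ⟨hl1, j1, hj1, hts1⟩
  · obtain ⟨hidx1, hcnt1⟩ := pvSingleton hl1
    rcases pvTwoSmallest_eq ar2 h2 with ⟨hl2, hts2⟩ | ⟨hl2, j2, hj2, hts2⟩
    · obtain ⟨hidx2, hcnt2⟩ := pvSingleton hl2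
      exact absurd ⟨Or.inl hl1, pvBad_true h1 h2 (by rw [hidx1, hidx2]) hcnt1 hcnt2⟩ hbig
    · have hnot : ¬ (ar1.idxOf (pvMval ar1) = ar2.idxOf (pvMval ar2)
          ∧ ar2.count (pvMval ar2) = 1) :=
        fun ⟨ha, hb2⟩ => hbig ⟨Or.inl hl1, pvBad_true h1 h2 ha hcnt1 hb2⟩
      have hcp2 := pvCount_pos h2
      have hcnd : ar1.idxOf (pvMval ar1) ≠ ar2.idxOf (pvMval ar2)
          ∨ 1 < ar1.count (pvMval ar1) ∨ 1 < ar2.count (pvMval ar2) := by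
        by_cases hq : ar1.idxOf (pvMval ar1) = ar2.idxOf (pvMval ar2)
        · refine Or.inr (Or.inr ?_)
          rcases Nat.lt_or_ge 1 (ar2.count (pvMval ar2)) with hlt | hge
          · exact hlt
          · exact absurd ⟨hq, by omega⟩ hnot
        · exact Or.inl hq
      rw [pvA_easy h1 h2 hcnd]
      symm
      apply pvAlt_eq
      · rw [hts1, hts2]
        by_cases hq : (ar1.idxOf (pvMval ar1) : Int) = (ar2.idxOf (pvMval ar2) : Int)
        · have hc2 : 1 < ar2.count (pvMval ar2) := by
            rcases hcnd with hcnd | hcnd | hcnd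
            · exact absurd (by exact_mod_cast hq) hcnd
            · rw [hcnt1] at hcnd; omega
            · exact hcnd
          refine ⟨(pvMval ar1, ((ar1.idxOf (pvMval ar1) : Nat) : Int)), by simp,
            (pvMval (ar2.erase (pvMval ar2)), j2), by simp, ?_, ?_⟩
          · simpa [hq] using (Ne.symm hj2)
          · rw [pvNm_of_count hc2]
        · exact ⟨(pvMval ar1, _), by simp, (pvMval ar2, _), by simp, hq, rfl⟩
      · intro p hp q hq hne
        rw [hts1] at hp; rw [hts2] at hq
        simp only [List.mem_cons, List.not_mem_nil, or_false] at hp hq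
        have hq1 : pvMval ar2 ≤ q.1 := by
          rcases hq with rfl | rfl
          · exact le_rfl
          · exact pvNm_ge hl2
        subst hp
        omega
  · rcases pvTwoSmallest_eq ar2 h2 with ⟨hl2, hts2⟩ | ⟨hl2, j2, hj2, hts2⟩
    · -- len1 ≥ 2, len2 = 1 (symmetric to the case above)
      obtain ⟨hidx2, hcnt2⟩ := pvSingleton hl2
      have hnot : ¬ (ar1.idxOf (pvMval ar1) = ar2.idxOf (pvMval ar2)
          ∧ ar1.count (pvMval ar1) = 1) :=
        fun ⟨ha, hb1⟩ => hbig ⟨Or.inr hl2, pvBad_true h1 h2 ha hb1 hcnt2⟩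
      have hcp1 := pvCount_pos h1
      have hcnd : ar1.idxOf (pvMval ar1) ≠ ar2.idxOf (pvMval ar2)
          ∨ 1 < ar1.count (pvMval ar1) ∨ 1 < ar2.count (pvMval ar2) := by
        by_cases hq : ar1.idxOf (pvMval ar1) = ar2.idxOf (pvMval ar2)
        · refine Or.inr (Or.inl ?_)
          rcases Nat.lt_or_ge 1 (ar1.count (pvMval ar1)) with hlt | hge
          · exact hlt
          · exact absurd ⟨hq, by omega⟩ hnot
        · exact Or.inl hq
      rw [pvA_easy h1 h2 hcnd]
      symm
      apply pvAlt_eq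
      · rw [hts1, hts2]
        by_cases hq : (ar1.idxOf (pvMval ar1) : Int) = (ar2.idxOf (pvMval ar2) : Int)
        · have hc1 : 1 < ar1.count (pvMval ar1) := by
            rcases hcnd with hcnd | hcnd | hcnd
            · exact absurd (by exact_mod_cast hq) hcnd
            · exact hcnd
            · rw [hcnt2] at hcnd; omega
          refine ⟨(pvMval (ar1.erase (pvMval ar1)), j1), by simp,
            (pvMval ar2, ((ar2.idxOf (pvMval ar2) : Nat) : Int)), by simp, ?_, ?_⟩
          · simpa [hq] using hj1
          · rw [pvNm_of_count hc1]
        · exact ⟨(pvMval ar1, _), by simp, (pvMval ar2, _), by simp, hq, rfl⟩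
      · intro p hp q hq hne
        rw [hts1] at hp; rw [hts2] at hq
        simp only [List.mem_cons, List.not_mem_nil, or_false] at hp hq
        have hp1 : pvMval ar1 ≤ p.1 := by
          rcases hp with rfl | rfl
          · exact le_rfl
          · exact pvNm_ge hl1
        subst hq
        omega
    · -- both have ≥ 2 elements
      by_cases hcnd : ar1.idxOf (pvMval ar1) ≠ ar2.idxOf (pvMval ar2)
          ∨ 1 < ar1.count (pvMval ar1) ∨ 1 < ar2.count (pvMval ar2)
      · rw [pvA_easy h1 h2 hcnd]
        symm
        apply pvAlt_eq
        · rw [hts1, hts2]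
          by_cases hq : (ar1.idxOf (pvMval ar1) : Int) = (ar2.idxOf (pvMval ar2) : Int)
          · rcases hcnd with hcnd | hcnd | hcnd
            · exact absurd (by exact_mod_cast hq) hcnd
            · refine ⟨(pvMval (ar1.erase (pvMval ar1)), j1), by simp,
                (pvMval ar2, ((ar2.idxOf (pvMval ar2) : Nat) : Int)), by simp, ?_, ?_⟩
              · simpa [hq] using hj1
              · rw [pvNm_of_count hcnd]
            · refine ⟨(pvMval ar1, ((ar1.idxOf (pvMval ar1) : Nat) : Int)), by simp,
                (pvMval (ar2.erase (pvMval ar2)), j2), by simp, ?_, ?_⟩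
              · simpa [hq] using (Ne.symm hj2)
              · rw [pvNm_of_count hcnd]
          · exact ⟨(pvMval ar1, _), by simp, (pvMval ar2, _), by simp, hq, rfl⟩
        · intro p hp q hq hne
          rw [hts1] at hp; rw [hts2] at hq
          simp only [List.mem_cons, List.not_mem_nil, or_false] at hp hq
          have hp1 : pvMval ar1 ≤ p.1 := by
            rcases hp with rfl | rfl
            · exact le_rfl
            · exact pvNm_ge hl1
          have hq1 : pvMval ar2 ≤ q.1 := by
            rcases hq with rfl | rfl
            · exact le_rfl
            · exact pvNm_ge hl2
          omega
      · push_neg at hcnd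
        obtain ⟨hqidx, hc1le, hc2le⟩ := hcnd
        rw [pvA_hard h1 h2 hl1 hl2 (by push_neg; exact ⟨hqidx, hc1le, hc2le⟩)]
        symm
        apply pvAlt_eq
        · rcases le_total (pvMval (ar1.erase (pvMval ar1)) + pvMval ar2)
              (pvMval (ar2.erase (pvMval ar2)) + pvMval ar1) with hmm | hmm
          · refine ⟨(pvMval (ar1.erase (pvMval ar1)), j1), by rw [hts1]; simp,
              (pvMval ar2, ((ar2.idxOf (pvMval ar2) : Nat) : Int)), by rw [hts2]; simp, ?_, ?_⟩
            · simpa [hqidx] using hj1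
            · rw [min_eq_left hmm]
          · refine ⟨(pvMval ar1, ((ar1.idxOf (pvMval ar1) : Nat) : Int)), by rw [hts1]; simp,
              (pvMval (ar2.erase (pvMval ar2)), j2), by rw [hts2]; simp, ?_, ?_⟩
            · simpa [hqidx] using (Ne.symm hj2)
            · rw [min_eq_right hmm]; omega
        · intro p hp q hq hne
          rw [hts1] at hp; rw [hts2] at hq
          simp only [List.mem_cons, List.not_mem_nil, or_false] at hp hq
          rcases hp with rfl | rfl <;> rcases hq with rfl | rfl
          · exact absurd (show _ = _ by simpa using congrArg (Nat.cast : Nat → Int) hqidx) hne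
          · simp only [min_le_iff]
            right; omega
          · simp only [min_le_iff]
            left; omega
          · have hg1 : pvMval ar1 ≤ pvMval (ar1.erase (pvMval ar1)) := pvNm_ge hl1
            have hg2 : pvMval ar2 ≤ pvMval (ar2.erase (pvMval ar2)) := pvNm_ge hl2
            simp only [min_le_iff]
            left; omega

-- ===== VERDICT (by name: the statement is the Claim_ definition above) =====
theorem twinArrays_spec : Claim_equal_twinArrays := by
  intro ar1 ar2 _ hpre
  unfold Spec_twinArrays
  exact pvEquiv ar1 ar2 hpre
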